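-- pv_equiv track=rewrite | github.com/Men-cotton/gnn-modelzoo-fork | analyze/WIO/wio_summary_visualizer.py | _parse_y_span
-- ===== SOURCE A (Python) =====
-- from typing import Any, Dict, Iterable, List, Tuple
--
-- def _parse_y_span(token: str) -> Tuple[int, int]:
--     parts = [p.strip() for p in token.replace(" ", "").split(",") if p.strip()]
--     if not parts:
--         return (0, 0)
--     numbers = [int(p) for p in parts if p.isdigit()]
--     if not numbers:
--         return (0, 0)
--     return (min(numbers), max(numbers))
-- ===== SOURCE B (Python) =====
-- def _parse_y_span(token):
--     # One-pass character scanner: no replace/split/strip pipeline, no intermediate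
--     # lists.  Each comma-terminated segment is recognised by a small state machine
--     # (0 = leading whitespace, 1 = in digits, 2 = trailing whitespace, 3 = invalid),
--     # collecting the digit run in `buf`; a running (lo, hi) replaces min()/max().
--     lo = hi = None
--     buf = ""   # digit run of the current segment
--     state = 0
--     for ch in token + ",":
--         if ch == ",":
--             if state == 1 or state == 2:
--                 n = int(buf)
--                 if lo is None:
--                     lo = hi = n
--                 else:
--                     if n < lo:
--                         lo = n
--                     if n > hi:
--                         hi = n
--             buf = ""
--             state = 0
--         elif ch == " ":
--             pass                      # spaces are ignored everywhere
--         elif "0" <= ch <= "9":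
--             if state <= 1:
--                 buf += ch
--                 state = 1
--             else:
--                 state = 3             # digits after trailing whitespace
--         elif ch.isspace():
--             if state == 1:
--                 state = 2
--         else:
--             state = 3                 # any other character spoils the segment
--     return (0, 0) if lo is None else (lo, hi)
-- ===== Notes on version B (the rewrite author's own statement) =====
-- stated objective: alternative
-- what changed: Replaces the replace/split/strip pipeline with its filtered lists and the min()/max() reduce passes by a single character-level scan: a 4-state machine recognises each comma-terminated segment (leading whitespace / digit run / trailing whitespace / invalid), buffering the digit run and updating a running (lo, hi) at each comma.
import Mathlib
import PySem

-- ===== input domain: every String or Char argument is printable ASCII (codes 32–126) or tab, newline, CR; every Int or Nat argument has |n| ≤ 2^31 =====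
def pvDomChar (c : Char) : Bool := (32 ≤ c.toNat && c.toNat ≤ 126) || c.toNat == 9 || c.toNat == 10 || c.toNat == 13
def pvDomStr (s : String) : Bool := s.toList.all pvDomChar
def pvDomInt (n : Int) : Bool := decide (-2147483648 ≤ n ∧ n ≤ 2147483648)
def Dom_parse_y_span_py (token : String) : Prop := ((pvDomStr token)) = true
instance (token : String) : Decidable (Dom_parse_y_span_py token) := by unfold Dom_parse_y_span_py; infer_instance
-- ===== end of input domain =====

-- B replaces A's replace/split/strip/min/max pipeline with a one-pass character state machine; objective: alternative.


-- ===== PORT A =====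
def parse_y_span_py (token : String) : Int × Int :=
  let parts := ((PySem.Chars.splitOn (PySem.Chars.replace token.toList [' '] []) [',']).filter
      (fun p => PySem.Chars.strip p != [])).map PySem.Chars.strip
  if parts = [] then (0, 0)
  else
    let numbers := (parts.filter (fun p => PySem.Chars.strIsdigit p)).map
        (fun p => (PySem.Int.ofChars? p).getD 0)   -- int(p): p is all ASCII digits here, so ofChars? never returns none
    if numbers = [] then (0, 0)
    else ((PySem.List.min? numbers (fun x => x)).getD 0,
          (PySem.List.max? numbers (fun x => x)).getD 0)

-- ===== PORT B =====
-- Source B's running (lo, hi) update ('if lo is None … else …')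
def pvUpd (acc : Option (Int × Int)) (n : Int) : Option (Int × Int) :=
  match acc with
  | none => some (n, n)
  | some (lo, hi) => some (if n < lo then n else lo, if n > hi then n else hi)

-- Source B's segment-closing action at a comma: accept the buffered digits iff state ∈ {1, 2}
def pvClose (acc : Option (Int × Int)) (buf : List Char) (s : Nat) : Option (Int × Int) :=
  if s == 1 || s == 2 then pvUpd acc ((PySem.Int.ofChars? buf).getD 0) else acc
  -- int(buf): buf is a nonempty run of ASCII digits whenever s ∈ {1, 2}, so ofChars? never returns none

-- one character of Source B's scanner; st = (lo/hi so far, digit buffer, segment state 0..3)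
def pvStep (st : Option (Int × Int) × List Char × Nat) (ch : Char) :
    Option (Int × Int) × List Char × Nat :=
  if ch == ',' then
    (pvClose st.1 st.2.1 st.2.2, [], 0)
  else if ch == ' ' then st
  else if decide ('0' ≤ ch) && decide (ch ≤ '9') then
    (if st.2.2 ≤ 1 then (st.1, st.2.1 ++ [ch], 1) else (st.1, st.2.1, 3))
  else if PySem.Chars.isspace ch then
    (st.1, st.2.1, if st.2.2 == 1 then 2 else st.2.2)
  else (st.1, st.2.1, 3)

def parse_y_span_py_alt (token : String) : Int × Int :=
  match ((token.toList ++ [',']).foldl pvStep (none, [], 0)).1 with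
  | none => (0, 0)
  | some r => r

-- ===== PRECONDITION & SPEC =====
def Spec_parse_y_span_py (token : String) (out : Int × Int) : Prop := out = parse_y_span_py_alt token
instance (token : String) (out : Int × Int) : Decidable (Spec_parse_y_span_py token out) := by
  unfold Spec_parse_y_span_py; infer_instance

-- ===== CLAIM =====
def Claim_equal_parse_y_span_py : Prop :=
  ∀ (token : String), Dom_parse_y_span_py token → Spec_parse_y_span_py token (parse_y_span_py token)

-- ===== LEMMAS AND PROOFS =====

-- ---- character facts ----
def pvIsDig (c : Char) : Bool := decide ('0' ≤ c) && decide (c ≤ '9')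

lemma pv_digit_toNat (c : Char) (h : pvIsDig c = true) : 48 ≤ c.toNat ∧ c.toNat ≤ 57 := by
  simp only [pvIsDig, Bool.and_eq_true, decide_eq_true_eq] at h
  exact ⟨(Iff.rfl : ('0' ≤ c) ↔ 48 ≤ c.toNat).mp h.1, (Iff.rfl : (c ≤ '9') ↔ c.toNat ≤ 57).mp h.2⟩

lemma pv_ws_toNat (c : Char) (h : PySem.Chars.isspace c = true) :
    ¬ (48 ≤ c.toNat ∧ c.toNat ≤ 57) := by
  simp only [PySem.Chars.isspace, Bool.or_eq_true, Bool.and_eq_true, decide_eq_true_eq] at h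
  omega

lemma pv_ws_not_digit (c : Char) (h : PySem.Chars.isspace c = true) : pvIsDig c = false := by
  rcases hd : pvIsDig c with _ | _
  · rfl
  · exact absurd (pv_digit_toNat c hd) (pv_ws_toNat c h)

lemma pv_digit_not_ws (c : Char) (h : pvIsDig c = true) : PySem.Chars.isspace c = false := by
  rcases hw : PySem.Chars.isspace c with _ | _
  · rfl
  · exact absurd (pv_digit_toNat c h) (pv_ws_toNat c hw)

lemma pv_digit_ne_comma (c : Char) (h : pvIsDig c = true) : c ≠ ',' := by
  intro he; subst he; exact absurd h (by decide)

lemma pv_digit_ne_space (c : Char) (h : pvIsDig c = true) : c ≠ ' ' := by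
  intro he; subst he; exact absurd h (by decide)

lemma pv_isdigit_eq (c : Char) : PySem.Chars.isdigit c = pvIsDig c := rfl

-- ---- generic list helpers ----
lemma pv_head_mem {l : List Char} {x : Char} (h : l.head? = some x) : x ∈ l := by
  cases l with
  | nil => simp at h
  | cons a t => simp at h; simp [h]

lemma pv_dropWhile_head {p : Char → Bool} {l : List Char} {x : Char}
    (h : (l.dropWhile p).head? = some x) : p x = false := by
  induction l with
  | nil => simp at h
  | cons a t ih =>
    by_cases ha : p a
    · rw [List.dropWhile_cons_of_pos ha] at h; exact ih h
    · rw [List.dropWhile_cons_of_neg ha] at h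
      simp at h
      rw [← h]
      simpa using ha

lemma pv_dropWhile_of_all_not {p : Char → Bool} {l : List Char}
    (h : ∀ x ∈ l, p x = false) : l.dropWhile p = l := by
  cases l with
  | nil => rfl
  | cons a t => exact List.dropWhile_cons_of_neg (by simp [h a (by simp)])

lemma pv_rstrip_prefix (l : List Char) : PySem.Chars.rstrip l <+: l := by
  obtain ⟨s, hs⟩ := List.dropWhile_suffix (l := l.reverse) (p := PySem.Chars.isspace)
  refine ⟨s.reverse, ?_⟩
  have h2 : (s ++ List.dropWhile PySem.Chars.isspace l.reverse).reverse = l := by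
    rw [hs, List.reverse_reverse]
  rw [List.reverse_append] at h2
  simpa [PySem.Chars.rstrip] using h2

lemma pv_prefix_head {l p : List Char} (h : p <+: l) (hne : p ≠ []) : p.head? = l.head? := by
  obtain ⟨t, rfl⟩ := h
  cases p with
  | nil => exact absurd rfl hne
  | cons a s => simp

lemma pv_rstrip_eq_nil_iff (l : List Char) :
    PySem.Chars.rstrip l = [] ↔ ∀ x ∈ l, PySem.Chars.isspace x = true := by
  simp [PySem.Chars.rstrip, List.dropWhile_eq_nil_iff]

lemma pv_rstrip_all_not (l : List Char)
    (h : ∀ x ∈ l, PySem.Chars.isspace x = false) : PySem.Chars.rstrip l = l := by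
  simp only [PySem.Chars.rstrip]
  rw [pv_dropWhile_of_all_not (fun x hx => h x (List.mem_reverse.mp hx)),
    List.reverse_reverse]

lemma pv_rstrip_append_ws (ds r : List Char)
    (h : ∀ x ∈ r, PySem.Chars.isspace x = true) :
    PySem.Chars.rstrip (ds ++ r) = PySem.Chars.rstrip ds := by
  simp only [PySem.Chars.rstrip, List.reverse_append]
  rw [List.dropWhile_append]
  have hnil : List.dropWhile PySem.Chars.isspace r.reverse = [] := by
    rw [List.dropWhile_eq_nil_iff]
    intro x hx; exact h x (List.mem_reverse.mp hx)
  simp [hnil]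

lemma pv_rstrip_append_not_ws (ds r : List Char)
    (h : PySem.Chars.rstrip r ≠ []) :
    PySem.Chars.rstrip (ds ++ r) = ds ++ PySem.Chars.rstrip r := by
  have hne : (List.dropWhile PySem.Chars.isspace r.reverse).isEmpty = false := by
    rcases hq : List.dropWhile PySem.Chars.isspace r.reverse with _ | ⟨a, t⟩
    · exact absurd (by simp [PySem.Chars.rstrip, hq]) h
    · simp
  simp only [PySem.Chars.rstrip, List.reverse_append]
  rw [List.dropWhile_append, hne]
  simp

lemma pv_strIsdigit_false_of_mem {l : List Char} {x : Char} (hx : x ∈ l)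
    (hd : pvIsDig x = false) : PySem.Chars.strIsdigit l = false := by
  simp only [PySem.Chars.strIsdigit, Bool.and_eq_false_iff]
  right
  rcases hall : l.all PySem.Chars.isdigit with _ | _
  · rfl
  · rw [List.all_eq_true] at hall
    have := hall x hx
    rw [pv_isdigit_eq, hd] at this
    simp at this

lemma pv_strIsdigit_true {l : List Char} (hne : l ≠ [])
    (h : ∀ x ∈ l, pvIsDig x = true) : PySem.Chars.strIsdigit l = true := by
  simp only [PySem.Chars.strIsdigit, Bool.and_eq_true]
  refine ⟨by simpa using hne, ?_⟩
  rw [List.all_eq_true]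
  intro x hx
  rw [pv_isdigit_eq]
  exact h x hx

lemma pv_modifyHead_id {α : Type} (l : List (List α)) :
    l.modifyHead (fun x => [] ++ x) = l := by
  cases l <;> rfl

lemma pv_modifyHead_id' {α : Type} (l : List (List α)) :
    l.modifyHead (fun x => x) = l := by
  cases l <;> rfl

lemma pv_modifyHead_congr {α : Type} (f g : List α → List α) (h : ∀ x, f x = g x)
    (l : List (List α)) : l.modifyHead f = l.modifyHead g := by
  cases l <;> simp [h]

-- ---- the replace / splitOn pipeline, characterized structurally ----
def pvSplit : List Char → List (List Char)
  | [] => [[]]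
  | c :: rest => if c = ',' then [] :: pvSplit rest else (pvSplit rest).modifyHead (c :: ·)

lemma pv_replace_go (l : List Char) : ∀ (fuel : Nat) (acc : List Char), l.length ≤ fuel →
    PySem.Chars.replace.go [' '] [] fuel l acc
      = acc.reverse ++ l.filter (fun c => !(c == ' ')) := by
  induction l with
  | nil =>
    intro fuel acc _
    cases fuel <;> simp [PySem.Chars.replace.go]
  | cons c t ih =>
    intro fuel acc hle
    cases fuel with
    | zero => simp at hle
    | succ f =>
      rw [PySem.Chars.replace.go]
      by_cases hc : c = ' '
      · subst hc
        have hpre : [' '].isPrefixOf (' ' :: t) = true := by simp [List.isPrefixOf]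
        simp only [hpre, if_true]
        rw [show List.drop [' '].length (' ' :: t) = t from rfl]
        rw [ih f ([].reverse ++ acc) (by simpa using hle)]
        simp
      · have hpre : [' '].isPrefixOf (c :: t) = false := by
          simp [List.isPrefixOf]
          exact fun h => absurd h.symm hc
        simp only [hpre, Bool.false_eq_true, if_false]
        rw [ih f (c :: acc) (by simpa using hle)]
        simp [hc]

lemma pv_replace_eq (l : List Char) :
    PySem.Chars.replace l [' '] [] = l.filter (fun c => !(c == ' ')) := by
  rw [PySem.Chars.replace]
  simp only [List.isEmpty_cons, Bool.false_eq_true, if_false]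
  exact pv_replace_go l l.length [] le_rfl

lemma pv_splitOn_go (l : List Char) : ∀ (fuel : Nat) (cur : List Char) (acc : List (List Char)),
    l.length ≤ fuel →
    PySem.Chars.splitOn.go [','] fuel l cur acc
      = acc.reverse ++ (pvSplit l).modifyHead (cur.reverse ++ ·) := by
  induction l with
  | nil =>
    intro fuel cur acc _
    cases fuel <;> simp [PySem.Chars.splitOn.go, pvSplit]
  | cons c t ih =>
    intro fuel cur acc hle
    cases fuel with
    | zero => simp at hle
    | succ f =>
      rw [PySem.Chars.splitOn.go]
      by_cases hc : c = ','
      · subst hc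
        have hpre : [','].isPrefixOf (',' :: t) = true := by simp [List.isPrefixOf]
        simp only [hpre, if_true]
        rw [show List.drop [','].length (',' :: t) = t from rfl]
        rw [ih f [] (cur.reverse :: acc) (by simpa using hle)]
        simp [pvSplit, pv_modifyHead_id']
      · have hpre : [','].isPrefixOf (c :: t) = false := by
          simp [List.isPrefixOf]
          exact fun h => absurd h.symm hc
        simp only [hpre, Bool.false_eq_true, if_false]
        rw [ih f (c :: cur) acc (by simpa using hle)]
        simp only [pvSplit, hc, if_false]
        rw [List.modifyHead_modifyHead]
        exact congrArg (acc.reverse ++ ·)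
          (pv_modifyHead_congr _ _ (fun x => by simp) (pvSplit t))

lemma pv_splitOn_eq (l : List Char) :
    PySem.Chars.splitOn l [','] = pvSplit l := by
  rw [PySem.Chars.splitOn]
  rw [pv_splitOn_go l (l.length + 1) [] [] (by omega)]
  simp [pv_modifyHead_id']

-- ---- the numbers both programs accept, per piece ----
def pvNums (L : List (List Char)) : List Int :=
  (L.filter (fun p => PySem.Chars.strIsdigit (PySem.Chars.strip p))).map
    (fun p => (PySem.Int.ofChars? (PySem.Chars.strip p)).getD 0)

lemma strIsdigit_nil_false : PySem.Chars.strIsdigit [] = false := rfl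

-- A's numbers list is pvNums of the split pieces
lemma numbers_eq (L : List (List Char)) :
    (((L.filter (fun p => PySem.Chars.strip p != [])).map PySem.Chars.strip).filter
        (fun p => PySem.Chars.strIsdigit p)).map (fun p => (PySem.Int.ofChars? p).getD 0)
    = pvNums L := by
  rw [List.filter_map, List.map_map, List.filter_filter]
  unfold pvNums
  congr 1
  apply List.filter_congr
  intro p _
  by_cases h : PySem.Chars.strIsdigit (PySem.Chars.strip p) = true
  · have hne : PySem.Chars.strip p ≠ [] := fun e => by
      rw [e] at h; simp [strIsdigit_nil_false] at h
    simp [Function.comp, h, hne]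
  · simp only [Bool.not_eq_true] at h
    simp [Function.comp, h]

lemma pvNums_single (u : List Char) :
    pvNums [u] = if PySem.Chars.strIsdigit (PySem.Chars.strip u) = true
      then [(PySem.Int.ofChars? (PySem.Chars.strip u)).getD 0] else [] := by
  by_cases h : PySem.Chars.strIsdigit (PySem.Chars.strip u) = true
  · simp [pvNums, h]
  · simp [pvNums, h]

lemma pvNums_cons (u : List Char) (ps : List (List Char)) :
    pvNums (u :: ps) = pvNums [u] ++ pvNums ps := by
  by_cases h : PySem.Chars.strIsdigit (PySem.Chars.strip u) = true
  · simp [pvNums, h]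
  · simp [pvNums, h]

-- ---- evaluating one scanner step per character class ----
lemma pvStep_comma (st : Option (Int × Int) × List Char × Nat) :
    pvStep st ',' = (pvClose st.1 st.2.1 st.2.2, [], 0) := by
  simp [pvStep]

lemma pvStep_space (st : Option (Int × Int) × List Char × Nat) :
    pvStep st ' ' = st := by
  simp [pvStep]

lemma pvStep_digitC (acc : Option (Int × Int)) (b : List Char) (s : Nat) (c : Char)
    (hc : pvIsDig c = true) :
    pvStep (acc, b, s) c = if s ≤ 1 then (acc, b ++ [c], 1) else (acc, b, 3) := by
  have h1 := pv_digit_ne_comma c hc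
  have h2 := pv_digit_ne_space c hc
  simp only [pvIsDig] at hc
  by_cases hs : s ≤ 1
  · simp [pvStep, h1, h2, hc, hs]
  · simp [pvStep, h1, h2, hc, hs]

lemma pvStep_wsC (acc : Option (Int × Int)) (b : List Char) (s : Nat) (c : Char)
    (hw : PySem.Chars.isspace c = true) (h1 : c ≠ ' ') (h2 : c ≠ ',') :
    pvStep (acc, b, s) c = (acc, b, if s == 1 then 2 else s) := by
  have hd := pv_ws_not_digit c hw
  simp only [pvIsDig] at hd
  simp [pvStep, h1, h2, hd, hw]

lemma pvStep_otherC (acc : Option (Int × Int)) (b : List Char) (s : Nat) (c : Char)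
    (h2 : c ≠ ',') (h1 : c ≠ ' ') (hd : pvIsDig c = false)
    (hw : PySem.Chars.isspace c = false) :
    pvStep (acc, b, s) c = (acc, b, 3) := by
  simp only [pvIsDig] at hd
  simp [pvStep, h1, h2, hd, hw]

-- ---- the scanner's run over one comma-free piece ----
def pvSt1 (r : List Char) : Nat :=
  if r = [] then 1 else if r.all PySem.Chars.isspace then 2 else 3

def pvSegQ (q : List Char) : List Char × Nat :=
  if q.takeWhile pvIsDig = [] then ([], if q = [] then 0 else 3)
  else (q.takeWhile pvIsDig, pvSt1 (q.dropWhile pvIsDig))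

def pvOk (u : List Char) : Prop := ∀ c ∈ u, c ≠ ' ' ∧ c ≠ ','

lemma pvS3 (u : List Char) (acc : Option (Int × Int)) (b : List Char)
    (hu : ∀ c ∈ u, c ≠ ',') :
    u.foldl pvStep (acc, b, 3) = (acc, b, 3) := by
  induction u with
  | nil => rfl
  | cons c t ih =>
    have hcm : c ≠ ',' := hu c (by simp)
    have hstep : pvStep (acc, b, 3) c = (acc, b, 3) := by
      by_cases hsp : c = ' '
      · subst hsp; exact pvStep_space _
      · by_cases hd : pvIsDig c = true
        · rw [pvStep_digitC acc b 3 c hd, if_neg (by omega)]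
        · by_cases hw : PySem.Chars.isspace c = true
          · rw [pvStep_wsC acc b 3 c hw hsp hcm]
            simp
          · rw [pvStep_otherC acc b 3 c hcm hsp (by simpa using hd) (by simpa using hw)]
    rw [List.foldl_cons, hstep]
    exact ih (fun x hx => hu x (by simp [hx]))

lemma pvS2 (u : List Char) (acc : Option (Int × Int)) (b : List Char)
    (hu : pvOk u) :
    u.foldl pvStep (acc, b, 2) = (acc, b, if u.all PySem.Chars.isspace then 2 else 3) := by
  induction u with
  | nil => rfl
  | cons c t ih =>
    obtain ⟨hsp, hcm⟩ := hu c (by simp)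
    have hrest : pvOk t := fun x hx => hu x (by simp [hx])
    by_cases hd : pvIsDig c = true
    · rw [List.foldl_cons, pvStep_digitC acc b 2 c hd, if_neg (by omega)]
      rw [pvS3 t acc b (fun x hx => (hrest x hx).2)]
      simp [List.all_cons, pv_digit_not_ws c hd]
    · by_cases hw : PySem.Chars.isspace c = true
      · rw [List.foldl_cons, pvStep_wsC acc b 2 c hw hsp hcm]
        rw [show (if (2 : Nat) == 1 then 2 else 2) = 2 from by simp]
        rw [ih hrest]
        simp [List.all_cons, hw]
      · rw [List.foldl_cons, pvStep_otherC acc b 2 c hcm hsp (by simpa using hd)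
          (by simpa using hw)]
        rw [pvS3 t acc b (fun x hx => (hrest x hx).2)]
        simp [List.all_cons, hw]

lemma pvS1 (u : List Char) (acc : Option (Int × Int)) (ds : List Char)
    (hu : pvOk u) :
    u.foldl pvStep (acc, ds, 1)
      = (acc, ds ++ u.takeWhile pvIsDig, pvSt1 (u.dropWhile pvIsDig)) := by
  induction u generalizing ds with
  | nil => simp [pvSt1]
  | cons c t ih =>
    obtain ⟨hsp, hcm⟩ := hu c (by simp)
    have hrest : pvOk t := fun x hx => hu x (by simp [hx])
    by_cases hd : pvIsDig c = true
    · rw [List.foldl_cons, pvStep_digitC acc ds 1 c hd, if_pos (by omega)]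
      rw [ih (ds ++ [c]) hrest]
      rw [List.takeWhile_cons_of_pos hd, List.dropWhile_cons_of_pos hd]
      simp
    · by_cases hw : PySem.Chars.isspace c = true
      · rw [List.foldl_cons, pvStep_wsC acc ds 1 c hw hsp hcm]
        rw [show (if (1 : Nat) == 1 then 2 else 1) = 2 from by simp]
        rw [pvS2 t acc ds hrest]
        rw [List.takeWhile_cons_of_neg hd, List.dropWhile_cons_of_neg hd]
        simp [pvSt1, List.all_cons, hw]
      · rw [List.foldl_cons, pvStep_otherC acc ds 1 c hcm hsp (by simpa using hd)
          (by simpa using hw)]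
        rw [pvS3 t acc ds (fun x hx => (hrest x hx).2)]
        rw [List.takeWhile_cons_of_neg hd, List.dropWhile_cons_of_neg hd]
        simp [pvSt1, List.all_cons, hw]

lemma pvSA (u : List Char) (acc : Option (Int × Int)) (hu : pvOk u) :
    u.foldl pvStep (acc, [], 0) = (acc, pvSegQ (u.dropWhile PySem.Chars.isspace)) := by
  induction u with
  | nil => simp [pvSegQ]
  | cons c t ih =>
    obtain ⟨hsp, hcm⟩ := hu c (by simp)
    have hrest : pvOk t := fun x hx => hu x (by simp [hx])
    by_cases hd : pvIsDig c = true
    · rw [List.foldl_cons, pvStep_digitC acc [] 0 c hd, if_pos (by omega)]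
      rw [show ([] : List Char) ++ [c] = [c] from rfl]
      rw [pvS1 t acc [c] hrest]
      rw [List.dropWhile_cons_of_neg (by simp [pv_digit_not_ws c hd])]
      rw [show pvSegQ (c :: t) = (c :: t.takeWhile pvIsDig, pvSt1 (t.dropWhile pvIsDig)) from by
        simp [pvSegQ, List.takeWhile_cons_of_pos hd, List.dropWhile_cons_of_pos hd]]
      simp
    · by_cases hw : PySem.Chars.isspace c = true
      · rw [List.foldl_cons, pvStep_wsC acc [] 0 c hw hsp hcm]
        rw [show (if (0 : Nat) == 1 then 2 else 0) = 0 from by simp]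
        rw [ih hrest, List.dropWhile_cons_of_pos hw]
      · rw [List.foldl_cons, pvStep_otherC acc [] 0 c hcm hsp (by simpa using hd)
          (by simpa using hw)]
        rw [pvS3 t acc [] (fun x hx => (hrest x hx).2)]
        rw [List.dropWhile_cons_of_neg (by simp [hw])]
        rw [show pvSegQ (c :: t) = ([], 3) from by
          simp [pvSegQ, List.takeWhile_cons_of_neg hd]]

-- closing a segment at the comma: the scanner accepts exactly A's strip/isdigit test
lemma pv_comma_core (q : List Char) (acc : Option (Int × Int))
    (hhead : ∀ x, q.head? = some x → PySem.Chars.isspace x = false) :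
    pvClose acc (pvSegQ q).1 (pvSegQ q).2
      = (if PySem.Chars.strIsdigit (PySem.Chars.rstrip q) = true
          then [(PySem.Int.ofChars? (PySem.Chars.rstrip q)).getD 0] else []).foldl pvUpd acc := by
  by_cases hds : q.takeWhile pvIsDig = []
  · rcases hq : q with _ | ⟨x, xs⟩
    · simp [pvSegQ, pvClose, PySem.Chars.rstrip, strIsdigit_nil_false]
    · subst hq
      have hxws : PySem.Chars.isspace x = false := hhead x rfl
      have hxd : pvIsDig x = false := by
        rcases hdx : pvIsDig x with _ | _
        · rfl
        · rw [List.takeWhile_cons_of_pos hdx] at hds; simp at hds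
      have hne : PySem.Chars.rstrip (x :: xs) ≠ [] := by
        intro hnil
        have hall := (pv_rstrip_eq_nil_iff _).mp hnil
        simp [hall x (by simp)] at hxws
      have hhd : (PySem.Chars.rstrip (x :: xs)).head? = some x := by
        rw [pv_prefix_head (pv_rstrip_prefix _) hne]; rfl
      have hfalse : PySem.Chars.strIsdigit (PySem.Chars.rstrip (x :: xs)) = false :=
        pv_strIsdigit_false_of_mem (pv_head_mem hhd) hxd
      simp [pvSegQ, hds, pvClose, hfalse]
  · have hsplit : q.takeWhile pvIsDig ++ q.dropWhile pvIsDig = q :=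
      List.takeWhile_append_dropWhile
    have hdig : ∀ x ∈ q.takeWhile pvIsDig, pvIsDig x = true :=
      fun x hx => List.mem_takeWhile_imp hx
    have hdsdig : PySem.Chars.rstrip (q.takeWhile pvIsDig) = q.takeWhile pvIsDig :=
      pv_rstrip_all_not _ (fun x hx => pv_digit_not_ws x (hdig x hx))
    rcases hr : q.dropWhile pvIsDig with _ | ⟨y, ys⟩
    · -- all of q is digits
      have hq : q = q.takeWhile pvIsDig := by
        conv_lhs => rw [← hsplit]
        rw [hr, List.append_nil]
      have hseg : pvSegQ q = (q.takeWhile pvIsDig, 1) := by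
        simp only [pvSegQ, hds, if_false, hr]
        simp [pvSt1]
      rw [hseg]
      have hstrip : PySem.Chars.rstrip q = q.takeWhile pvIsDig := by
        conv_lhs => rw [hq]
        exact hdsdig
      have htrue : PySem.Chars.strIsdigit (q.takeWhile pvIsDig) = true :=
        pv_strIsdigit_true hds hdig
      simp [pvClose, hstrip, htrue]
    · by_cases hall : (q.dropWhile pvIsDig).all PySem.Chars.isspace = true
      · -- digits then trailing whitespace only
        have hallc : (y :: ys).all PySem.Chars.isspace = true := by rw [← hr]; exact hall
        have hseg : pvSegQ q = (q.takeWhile pvIsDig, 2) := by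
          simp only [pvSegQ, hds, if_false, hr]
          simp [pvSt1, hallc]
        rw [hseg]
        have hstrip : PySem.Chars.rstrip q = q.takeWhile pvIsDig := by
          conv_lhs => rw [← hsplit]
          rw [pv_rstrip_append_ws _ _ (by
            intro x hx
            rw [List.all_eq_true] at hall
            exact hall x hx), hdsdig]
        have htrue : PySem.Chars.strIsdigit (q.takeWhile pvIsDig) = true :=
          pv_strIsdigit_true hds hdig
        simp [pvClose, hstrip, htrue]
      · -- something non-whitespace after the digits: invalid
        have hallc : (y :: ys).all PySem.Chars.isspace = false := by
          rw [← hr]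
          rcases h : (q.dropWhile pvIsDig).all PySem.Chars.isspace with _ | _
          · rfl
          · exact absurd h hall
        have hseg : pvSegQ q = (q.takeWhile pvIsDig, 3) := by
          simp only [pvSegQ, hds, if_false, hr]
          simp [pvSt1, hallc]
        rw [hseg]
        have hrne : PySem.Chars.rstrip (q.dropWhile pvIsDig) ≠ [] := by
          intro hnil
          exact hall (by rw [List.all_eq_true]; exact (pv_rstrip_eq_nil_iff _).mp hnil)
        have hstrip : PySem.Chars.rstrip q
            = q.takeWhile pvIsDig ++ PySem.Chars.rstrip (q.dropWhile pvIsDig) := by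
          conv_lhs => rw [← hsplit]
          exact pv_rstrip_append_not_ws _ _ hrne
        have hyd : pvIsDig y = false := by
          have hy : (q.dropWhile pvIsDig).head? = some y := by rw [hr]; rfl
          exact pv_dropWhile_head hy
        have hyhd : (PySem.Chars.rstrip (q.dropWhile pvIsDig)).head? = some y := by
          rw [pv_prefix_head (pv_rstrip_prefix _) hrne, hr]; rfl
        have hymem : y ∈ PySem.Chars.rstrip q := by
          rw [hstrip]
          exact List.mem_append.mpr (Or.inr (pv_head_mem hyhd))
        have hfalse : PySem.Chars.strIsdigit (PySem.Chars.rstrip q) = false :=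
          pv_strIsdigit_false_of_mem hymem hyd
        simp [pvClose, hfalse]

lemma pv_comma (u : List Char) (acc : Option (Int × Int)) (hu : pvOk u) :
    pvStep (u.foldl pvStep (acc, [], 0)) ',' = ((pvNums [u]).foldl pvUpd acc, [], 0) := by
  rw [pvSA u acc hu, pvStep_comma, pvNums_single]
  have hstrip : PySem.Chars.strip u
      = PySem.Chars.rstrip (u.dropWhile PySem.Chars.isspace) := by
    simp [PySem.Chars.strip, PySem.Chars.lstrip]
  rw [hstrip]
  exact congrArg (fun a => (a, ([] : List Char), (0 : Nat)))
    (pv_comma_core (u.dropWhile PySem.Chars.isspace) acc (fun x hx => pv_dropWhile_head hx))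

-- the scanner ignores spaces entirely
lemma pv_foldl_filter (u : List Char) (st : Option (Int × Int) × List Char × Nat) :
    u.foldl pvStep st = (u.filter (fun c => !(c == ' '))).foldl pvStep st := by
  induction u generalizing st with
  | nil => rfl
  | cons c t ih =>
    by_cases hc : c = ' '
    · subst hc
      rw [List.foldl_cons, pvStep_space, List.filter_cons_of_neg (by simp)]
      exact ih st
    · rw [List.foldl_cons, List.filter_cons_of_pos (by simp [hc]), List.foldl_cons]
      exact ih _

-- the main loop invariant: the scanner over cs ++ ',' folds pvUpd over the per-piece numbers
lemma pv_main (cs : List Char) : ∀ (u : List Char) (acc : Option (Int × Int)),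
    (∀ c ∈ cs, c ≠ ' ') → pvOk u →
    (cs ++ [',']).foldl pvStep (u.foldl pvStep (acc, [], 0))
      = ((pvNums ((pvSplit cs).modifyHead (u ++ ·))).foldl pvUpd acc, [], 0) := by
  induction cs with
  | nil =>
    intro u acc _ hu
    simp only [List.nil_append, List.foldl_cons, List.foldl_nil]
    rw [pv_comma u acc hu]
    rw [show (pvSplit []).modifyHead (fun x => u ++ x) = [u ++ []] from rfl, List.append_nil]
  | cons c rest ih =>
    intro u acc hcs hu
    by_cases hc : c = ','
    · subst hc
      simp only [List.cons_append, List.foldl_cons]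
      rw [pv_comma u acc hu]
      have h2 := ih [] ((pvNums [u]).foldl pvUpd acc)
        (fun x hx => hcs x (by simp [hx])) (by intro x hx; simp at hx)
      simp only [List.foldl_nil] at h2
      rw [h2, pv_modifyHead_id]
      rw [show pvSplit (',' :: rest) = [] :: pvSplit rest from by simp [pvSplit]]
      rw [show List.modifyHead (fun x => u ++ x) ([] :: pvSplit rest)
          = (u ++ []) :: pvSplit rest from rfl]
      rw [List.append_nil, pvNums_cons u (pvSplit rest), List.foldl_append]
    · simp only [List.cons_append, List.foldl_cons]
      have hcsp : c ≠ ' ' := hcs c (by simp)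
      rw [show pvStep (u.foldl pvStep (acc, [], 0)) c
          = (u ++ [c]).foldl pvStep (acc, [], 0) from by rw [List.foldl_append]; rfl]
      rw [ih (u ++ [c]) acc (fun x hx => hcs x (by simp [hx]))
        (by
          intro x hx
          rcases List.mem_append.mp hx with h | h
          · exact hu x h
          · simp at h; subst h; exact ⟨hcsp, hc⟩)]
      simp only [pvSplit, hc, if_false]
      rw [List.modifyHead_modifyHead]
      rw [pv_modifyHead_congr ((fun x => u ++ x) ∘ fun x => c :: x)
        (fun x => u ++ [c] ++ x) (fun x => by simp) (pvSplit rest)]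

-- Source B's running update over a list, versus the min/max folds
lemma pv_foldl_pvUpd_some (t : List Int) (lo hi : Int) :
    t.foldl pvUpd (some (lo, hi)) = some (t.foldl min lo, t.foldl max hi) := by
  induction t generalizing lo hi with
  | nil => rfl
  | cons n t ih =>
    simp only [List.foldl_cons]
    rw [show pvUpd (some (lo, hi)) n
        = some (if n < lo then n else lo, if n > hi then n else hi) from rfl]
    rw [ih]
    have h1 : (if n < lo then n else lo) = min lo n := by
      rw [Int.min_def]; split_ifs <;> omega
    have h2 : (if n > hi then n else hi) = max hi n := by
      rw [Int.max_def]; split_ifs <;> omega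
    rw [h1, h2]

-- ===== VERDICT =====
theorem parse_y_span_py_spec : Claim_equal_parse_y_span_py := by
  intro token _
  unfold Spec_parse_y_span_py parse_y_span_py parse_y_span_py_alt
  dsimp only
  have hB : ((token.toList ++ [',']).foldl pvStep (none, [], 0))
      = ((pvNums (pvSplit (token.toList.filter (fun c => !(c == ' '))))).foldl pvUpd none,
         [], 0) := by
    rw [List.foldl_append, pv_foldl_filter token.toList, ← List.foldl_append]
    have h := pv_main (token.toList.filter (fun c => !(c == ' '))) [] none
      (by intro c hc; simpa using (List.of_mem_filter hc)) (by intro x hx; simp at hx)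
    simp only [List.foldl_nil] at h
    rw [h, pv_modifyHead_id]
  rw [hB, pv_replace_eq, pv_splitOn_eq, numbers_eq]
  rcases hn : pvNums (pvSplit (token.toList.filter (fun c => !(c == ' ')))) with _ | ⟨x, t⟩
  · split_ifs <;> simp_all
  · have hnum := numbers_eq (pvSplit (token.toList.filter (fun c => !(c == ' '))))
    rw [hn] at hnum
    have hparts :
        (((pvSplit (token.toList.filter (fun c => !(c == ' ')))).filter
            (fun p => PySem.Chars.strip p != [])).map PySem.Chars.strip) ≠ [] := by
      intro h0
      rw [h0] at hnum
      simp at hnum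
    rw [if_neg hparts, if_neg (by simp)]
    rw [PySem.List.min?_id_cons, PySem.List.max?_id_cons]
    simp only [List.foldl_cons]
    rw [show pvUpd none x = some (x, x) from rfl, pv_foldl_pvUpd_some]
    rfl
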